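-- pv_equiv track=rewrite | github.com/dc-carrolls/carrolls-classwork3 | Recursion/linearsearchrec.py | bubble_sort_pass
-- ===== SOURCE A (Python) =====
-- def bubble_sort_pass(array, ap, size):
--     # We return the number of swaps in this iteration.
--     swaps = 0
--
--     # If the array contains 0 or 1 elements, it is already sorted.
--     if (size < 2):
--         return swaps
--     #end if
--
--     # Array contains at least 2 elements.
--     if (array[ap] > array[ap+1]):
--         # First two elements are in wrong order. We need to swap them.
--         array[ap],array[ap+1] = array[ap+1],array[ap]
--         swaps += 1
--     #end if
--
--     # Recursively bubble sort the array starting at the 2nd element.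
--     swaps = swaps + bubble_sort_pass(array, ap+1, size - 1)
--     return swaps
-- ===== SOURCE B (Python) =====
-- def bubble_sort_pass(array, ap, size):
--     # Iterative single bubble pass: same in-place swaps, same swap count.
--     swaps = 0
--     for i in range(ap, ap + size - 1):
--         if array[i] > array[i + 1]:
--             array[i], array[i + 1] = array[i + 1], array[i]
--             swaps += 1
--     return swaps
-- ===== Notes on version B (the rewrite author's own statement) =====
-- stated objective: simpler
-- what changed: Replaced the recursive helper-style descent (one comparison per call, swap count summed up the call chain) by a single iterative for-loop over range(ap, ap+size-1) with an accumulator; same in-place swaps and same return value.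
import Mathlib
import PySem

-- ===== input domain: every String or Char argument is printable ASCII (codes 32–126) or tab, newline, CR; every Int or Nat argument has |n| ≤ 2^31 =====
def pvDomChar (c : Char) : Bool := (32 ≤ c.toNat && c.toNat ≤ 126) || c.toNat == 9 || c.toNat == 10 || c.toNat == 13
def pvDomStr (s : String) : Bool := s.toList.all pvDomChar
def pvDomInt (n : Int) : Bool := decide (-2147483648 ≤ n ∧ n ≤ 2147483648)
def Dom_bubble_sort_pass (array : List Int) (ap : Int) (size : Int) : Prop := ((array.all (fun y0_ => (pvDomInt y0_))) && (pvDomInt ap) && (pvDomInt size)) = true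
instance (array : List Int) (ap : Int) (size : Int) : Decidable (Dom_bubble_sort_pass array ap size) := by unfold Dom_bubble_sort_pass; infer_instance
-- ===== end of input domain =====

-- B replaces A's recursion by an iterative accumulator loop (simpler; O(1) stack).
-- A mutates `array` in place (so does B, identically); the theorems below are about the RETURN value.

-- ===== PORT A =====
-- Recursive helper threading the mutated array; under Pre_ every index is in range,
-- so pyGetD/pySetD compute exactly Python's array[i] accesses/assignments.
def pvBubbleA (arr : List Int) (ap : Int) (size : Int) : List Int × Int :=
  if size < 2 then (arr, 0)
  else
    let x := PySem.List.pyGetD arr ap 0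
    let y := PySem.List.pyGetD arr (ap + 1) 0
    let (arr1, s) : List Int × Int :=
      if x > y then (PySem.List.pySetD (PySem.List.pySetD arr ap y) (ap + 1) x, 1)
      else (arr, 0)
    let r := pvBubbleA arr1 (ap + 1) (size - 1)
    (r.1, s + r.2)
termination_by size.toNat
decreasing_by omega

def bubble_sort_pass (array : List Int) (ap : Int) (size : Int) : Int :=
  (pvBubbleA array ap size).2

-- ===== PORT B =====
-- One loop body step: state = (current array, swaps so far).
def pvBubbleBStep (st : List Int × Int) (i : Int) : List Int × Int :=
  let x := PySem.List.pyGetD st.1 i 0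
  let y := PySem.List.pyGetD st.1 (i + 1) 0
  if x > y then (PySem.List.pySetD (PySem.List.pySetD st.1 i y) (i + 1) x, st.2 + 1)
  else st

def bubble_sort_pass_alt (array : List Int) (ap : Int) (size : Int) : Int :=
  (((PySem.List.pyRange ap (ap + size - 1) 1).foldl pvBubbleBStep (array, 0))).2

-- ===== PRECONDITION & SPEC =====
-- Exactly where Python A returns without IndexError: size < 2, or every accessed
-- index ap .. ap+size-1 is a valid Python index (negative indices allowed).
def Pre_bubble_sort_pass (array : List Int) (ap : Int) (size : Int) : Prop :=
  size < 2 ∨ (-(array.length : Int) ≤ ap ∧ ap + size ≤ (array.length : Int))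
instance (array : List Int) (ap : Int) (size : Int) : Decidable (Pre_bubble_sort_pass array ap size) := by
  unfold Pre_bubble_sort_pass; infer_instance

def pvWitness_bubble_sort_pass : List Int × Int × Int := ([3, 1, 2], 0, 3)

def Spec_bubble_sort_pass (array : List Int) (ap : Int) (size : Int) (out : Int) : Prop := out = bubble_sort_pass_alt array ap size
instance (array : List Int) (ap : Int) (size : Int) (out : Int) : Decidable (Spec_bubble_sort_pass array ap size out) := by unfold Spec_bubble_sort_pass; infer_instance

-- ===== CLAIM (what is proved, stated in full; the proofs are below) =====
def Claim_equal_bubble_sort_pass : Prop := ∀ (array : List Int) (ap : Int) (size : Int), Dom_bubble_sort_pass array ap size → Pre_bubble_sort_pass array ap size → Spec_bubble_sort_pass array ap size (bubble_sort_pass array ap size)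

-- ===== LEMMAS AND PROOFS =====

-- The fold over the remaining range computes A's recursion, with the swap count
-- shifted by the accumulator.  Holds unconditionally (no Pre_ needed).
theorem pvFold_eq_bubbleA (n : Nat) :
    ∀ (arr : List Int) (ap size : Int) (c : Int), size.toNat = n →
      (PySem.List.pyRange ap (ap + size - 1) 1).foldl pvBubbleBStep (arr, c)
        = ((pvBubbleA arr ap size).1, c + (pvBubbleA arr ap size).2) := by
  induction n with
  | zero =>
    intro arr ap size c h
    have hs : size < 2 := by omega
    rw [PySem.List.pyRange_one_eq_nil (by omega)]
    simp [pvBubbleA, hs]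
  | succ k ih =>
    intro arr ap size c h
    by_cases hs : size < 2
    · rw [PySem.List.pyRange_one_eq_nil (by omega)]
      simp [pvBubbleA, hs]
    · rw [PySem.List.pyRange_one_cons (by omega)]
      rw [List.foldl_cons]
      rw [pvBubbleA]
      simp only [if_neg hs]
      have harg : ap + size - 1 = (ap + 1) + (size - 1) - 1 := by ring
      by_cases hc : PySem.List.pyGetD arr ap 0 > PySem.List.pyGetD arr (ap + 1) 0
      · have hstep : pvBubbleBStep (arr, c) ap
            = (PySem.List.pySetD (PySem.List.pySetD arr ap (PySem.List.pyGetD arr (ap + 1) 0))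
                (ap + 1) (PySem.List.pyGetD arr ap 0), c + 1) := by
          simp [pvBubbleBStep, hc]
        rw [hstep, harg,
            ih _ (ap + 1) (size - 1) (c + 1) (by omega)]
        simp [hc]
        ring
      · have hstep : pvBubbleBStep (arr, c) ap = (arr, c) := by
          simp [pvBubbleBStep, hc]
        rw [hstep, harg, ih _ (ap + 1) (size - 1) c (by omega)]
        simp [hc]

-- ===== VERDICT (by name: the statement is the Claim_ definition above) =====
theorem bubble_sort_pass_spec : Claim_equal_bubble_sort_pass := by
  intro array ap size _ _
  unfold Spec_bubble_sort_pass bubble_sort_pass bubble_sort_pass_alt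
  rw [pvFold_eq_bubbleA size.toNat array ap size 0 rfl]
  simp
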